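-- pv_equiv track=rewrite | github.com/Madhuri97/CP-Problems | 01-nth_tidynumber-Python/nth_tidynumber.py | isTidyNumber
-- ===== SOURCE A (Python) =====
-- def isTidyNumber(n):
--     p = 10
--     while (n):
--         r = n%10 #2
--         n = n//10
--         if r > p:
--             return False
--         p = r
--     return True
-- ===== SOURCE B (Python) =====
-- def isTidyNumber(n):
--     s = str(n)
--     return s == ''.join(sorted(s))
-- ===== Notes on version B (the rewrite author's own statement) =====
-- stated objective: idiomatic
-- what changed: B replaces A's right-to-left arithmetic digit-popping loop (%/// with a carried previous digit) by converting the number to its decimal string and comparing it with its sorted copy; Pre_ excludes negative n, where A diverges at -1 and otherwise returns False through floor-mod wraparound on the sign — accidental values B's string form does not reproduce.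
-- outside the precondition, e.g. on isTidyNumber(-2): A returns False, B returns True; on isTidyNumber(-1): A does not finish within the time limit, B returns True; on isTidyNumber(-21): A returns False, B returns False
import Mathlib
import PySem

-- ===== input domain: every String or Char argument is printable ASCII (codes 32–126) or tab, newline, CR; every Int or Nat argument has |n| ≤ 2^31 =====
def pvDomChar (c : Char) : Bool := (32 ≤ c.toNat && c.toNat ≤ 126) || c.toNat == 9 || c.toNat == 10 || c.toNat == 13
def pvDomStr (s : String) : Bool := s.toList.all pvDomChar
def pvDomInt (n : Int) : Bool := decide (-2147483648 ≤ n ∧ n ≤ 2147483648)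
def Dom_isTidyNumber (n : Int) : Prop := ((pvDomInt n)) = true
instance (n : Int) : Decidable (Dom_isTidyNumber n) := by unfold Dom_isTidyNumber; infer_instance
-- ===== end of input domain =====

-- B rewrites A's right-to-left %-and-// digit loop as: str(n) equals its sorted copy (idiomatic; same behaviour on 0 ≤ n).

-- ===== PORT A =====
-- the while loop of A, carrying the previous digit p; the 'n ≤ 0' guard merges Python's exit
-- test 'while n' with a totality guard for n < 0 (outside Pre_, where A can diverge)
def tidyGo (p n : Int) : Bool :=
  if n ≤ 0 then true
  else
    let r := PySem.Int.mod n 10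
    if r > p then false
    else tidyGo r (PySem.Int.floordiv n 10)
termination_by n.toNat
decreasing_by
  have h10 : PySem.Int.floordiv n 10 = n / 10 := PySem.Int.floordiv_eq_ediv_of_pos (by omega)
  rw [h10]; omega

def isTidyNumber (n : Int) : Bool := tidyGo 10 n

-- ===== PORT B =====
def isTidyNumber_alt (n : Int) : Bool :=
  let s := PySem.Int.toStr n
  s.toList == PySem.List.sorted s.toList (fun c => c) false

-- ===== PRECONDITION & SPEC =====
-- Pre_ excludes negative n: A diverges at n = -1 (n//10 stalls at -1) and on other negatives returns
-- False via floor-mod wraparound on the sign, accidental values B's string form does not reproduce.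
def Pre_isTidyNumber (n : Int) : Prop := 0 ≤ n
instance (n : Int) : Decidable (Pre_isTidyNumber n) := by unfold Pre_isTidyNumber; infer_instance
def pvWitness_isTidyNumber : Int := (1234)

def Spec_isTidyNumber (n : Int) (out : Bool) : Prop := out = isTidyNumber_alt n
instance (n : Int) (out : Bool) : Decidable (Spec_isTidyNumber n out) := by
  unfold Spec_isTidyNumber; infer_instance

-- ===== CLAIM =====
def Claim_equal_isTidyNumber : Prop :=
  ∀ (n : Int), Dom_isTidyNumber n → Pre_isTidyNumber n → Spec_isTidyNumber n (isTidyNumber n)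

-- ===== LEMMAS AND PROOFS =====

-- the chain check A performs, read off the LSB-first digit list
def chainB (p : Int) : List Nat → Bool
  | [] => true
  | d :: ds => if (d : Int) > p then false else chainB (d : Int) ds

lemma tidyGo_eq_chainB (m : Nat) (p : Int) : tidyGo p (m : Int) = chainB p (Nat.digits 10 m) := by
  induction m using Nat.strong_induction_on generalizing p with
  | _ m ih =>
    rcases Nat.eq_zero_or_pos m with h0 | h0
    · subst h0; simp [tidyGo, chainB]
    · rw [tidyGo, if_neg (by omega : ¬ ((m : Int) ≤ 0)),
        Nat.digits_def' (by norm_num : 1 < 10) h0, chainB]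
      have hm : PySem.Int.mod (m : Int) 10 = ((m % 10 : Nat) : Int) := by
        exact_mod_cast PySem.Int.mod_natCast m 10
      have hd : PySem.Int.floordiv (m : Int) 10 = ((m / 10 : Nat) : Int) := by
        exact_mod_cast PySem.Int.floordiv_natCast m 10
      simp only [hm, hd]
      by_cases hc : ((m % 10 : Nat) : Int) > p
      · rw [if_pos hc, if_pos hc]
      · rw [if_neg hc, if_neg hc]
        exact ih (m / 10) (Nat.div_lt_self h0 (by norm_num)) _

-- fuel-accumulator shape of Nat.toDigitsCore
lemma toDigitsCore_acc (f : Nat) : ∀ (n : Nat) (acc : List Char),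
    Nat.toDigitsCore 10 f n acc = Nat.toDigitsCore 10 f n [] ++ acc := by
  induction f with
  | zero => intro n acc; simp [Nat.toDigitsCore]
  | succ f ih =>
    intro n acc
    simp only [Nat.toDigitsCore]
    by_cases h : n / 10 = 0
    · simp [h]
    · simp only [h, if_false]
      rw [ih (n / 10) (Nat.digitChar (n % 10) :: acc), ih (n / 10) [Nat.digitChar (n % 10)]]
      simp

lemma toDigitsCore_fuel (f : Nat) : ∀ (f' n : Nat), n < f → n < f' →
    Nat.toDigitsCore 10 f n [] = Nat.toDigitsCore 10 f' n [] := by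
  induction f with
  | zero => intro f' n h; omega
  | succ f ih =>
    intro f' n h h'
    cases f' with
    | zero => omega
    | succ f' =>
      simp only [Nat.toDigitsCore]
      by_cases hz : n / 10 = 0
      · simp [hz]
      · simp only [hz, if_false]
        have hn : n / 10 < n := Nat.div_lt_self (by omega) (by norm_num)
        rw [toDigitsCore_acc f, toDigitsCore_acc f',
          ih f' (n / 10) (by omega) (by omega)]

lemma toDigits_rec (m : Nat) (h : 10 ≤ m) :
    Nat.toDigits 10 m = Nat.toDigits 10 (m / 10) ++ [Nat.digitChar (m % 10)] := by
  have hz : m / 10 ≠ 0 := (Nat.div_pos h (by norm_num)).ne'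
  unfold Nat.toDigits
  simp only [Nat.toDigitsCore, hz, if_false]
  rw [toDigitsCore_acc]
  congr 1
  exact toDigitsCore_fuel m (m / 10 + 1) (m / 10)
    (lt_of_lt_of_le (Nat.div_lt_self (by omega) (by norm_num)) (by omega)) (by omega)

lemma toDigits_small (m : Nat) (h : m < 10) : Nat.toDigits 10 m = [Nat.digitChar m] := by
  unfold Nat.toDigits
  simp [Nat.toDigitsCore, Nat.div_eq_of_lt h, Nat.mod_eq_of_lt h]

-- toDigits of a positive m is the reversed digitChar image of Nat.digits
lemma toDigits_eq_digits (m : Nat) (h : 0 < m) :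
    Nat.toDigits 10 m = ((Nat.digits 10 m).map Nat.digitChar).reverse := by
  induction m using Nat.strong_induction_on with
  | _ m ih =>
    rw [Nat.digits_def' (by norm_num : 1 < 10) h]
    by_cases h10 : m < 10
    · have h0 : m / 10 = 0 := Nat.div_eq_of_lt h10
      rw [toDigits_small m h10, h0]
      simp [Nat.mod_eq_of_lt h10]
    · rw [toDigits_rec m (by omega),
        ih (m / 10) (Nat.div_lt_self h (by norm_num)) (by omega)]
      simp

lemma digitChar_le_iff (a b : Nat) (ha : a < 10) (hb : b < 10) :
    (Nat.digitChar a ≤ Nat.digitChar b) ↔ a ≤ b := by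
  interval_cases a <;> interval_cases b <;> decide

-- chainB p over a digit list is the head bound plus the non-increasing pairwise condition
lemma chainB_eq (ds : List Nat) (p : Int) :
    chainB p ds = ((match ds with | [] => true | d :: _ => decide ((d : Int) ≤ p)) &&
      decide (ds.Pairwise (fun a b => b ≤ a))) := by
  induction ds generalizing p with
  | nil => simp [chainB]
  | cons d ds ih =>
    rw [chainB, ih]
    by_cases hdp : (d : Int) ≤ p
    · rw [if_neg (by omega)]
      cases ds with
      | nil => simp [hdp]
      | cons e es =>
        have hiff : ((e : Int) ≤ (d : Int) ∧ (e :: es).Pairwise (fun a b => b ≤ a)) ↔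
            (d :: e :: es).Pairwise (fun a b => b ≤ a) := by
          constructor
          · rintro ⟨hed, hp⟩
            refine List.Pairwise.cons (fun x hx => ?_) hp
            rcases List.mem_cons.mp hx with rfl | hx
            · exact_mod_cast hed
            · exact le_trans ((List.pairwise_cons.mp hp).1 x hx) (by exact_mod_cast hed)
          · intro hp
            exact ⟨by exact_mod_cast (List.pairwise_cons.mp hp).1 e List.mem_cons_self,
              (List.pairwise_cons.mp hp).2⟩
        simp only [hdp, decide_true, Bool.true_and, ← Bool.decide_and]
        exact decide_eq_decide.mpr hiff
    · rw [if_pos (by omega)]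
      simp [hdp]

-- B's comparison with the sorted copy is exactly Pairwise (· ≤ ·)
lemma alt_eq_pairwise (L : List Char) :
    (L == PySem.List.sorted L (fun c => c) false) = decide (L.Pairwise (· ≤ ·)) := by
  by_cases hp : L.Pairwise (· ≤ ·)
  · simp [hp, PySem.List.sorted_eq_self_of_pairwise L (fun c => c) hp]
  · simp only [hp, decide_false, beq_eq_false_iff_ne, ne_eq]
    intro hL
    exact hp (by rw [hL]; exact PySem.List.sorted_pairwise L _)

-- ===== VERDICT =====
theorem isTidyNumber_spec : Claim_equal_isTidyNumber := by
  intro n _ hpre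
  unfold Spec_isTidyNumber isTidyNumber isTidyNumber_alt
  obtain ⟨m, rfl⟩ : ∃ m : Nat, n = (m : Int) := ⟨n.toNat, (Int.toNat_of_nonneg hpre).symm⟩
  rw [tidyGo_eq_chainB m 10]
  have hts : (PySem.Int.toStr (m : Int)).toList = Nat.toDigits 10 m := by
    rw [PySem.Int.toList_toStr]
    simp [PySem.Int.toChars, show ¬ ((m : Int) < 0) by omega]
  simp only [hts, alt_eq_pairwise]
  rcases Nat.eq_zero_or_pos m with h0 | h0
  · subst h0; simp [chainB, Nat.toDigits, Nat.toDigitsCore]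
  · rw [toDigits_eq_digits m h0, chainB_eq]
    have hlt : ∀ d ∈ Nat.digits 10 m, d < 10 :=
      fun d hd => Nat.digits_lt_base (by norm_num) hd
    have hchain : (Nat.toDigits 10 m = (((Nat.digits 10 m).map Nat.digitChar).reverse)) := toDigits_eq_digits m h0
    have hiff : ((Nat.digits 10 m).Pairwise (fun a b => b ≤ a)) ↔
        ((((Nat.digits 10 m).map Nat.digitChar).reverse).Pairwise (· ≤ ·)) := by
      rw [List.pairwise_reverse, List.pairwise_map]
      constructor <;> intro h <;>
        refine h.imp_of_mem (fun {a b} ha hb hab => ?_)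
      · exact (digitChar_le_iff b a (hlt b hb) (hlt a ha)).mpr hab
      · exact (digitChar_le_iff b a (hlt b hb) (hlt a ha)).mp hab
    cases hds : Nat.digits 10 m with
    | nil =>
      rw [hds] at hiff
      simp only [List.map_nil, List.reverse_nil]
      simp [decide_eq_decide.mpr hiff]
    | cons d ds =>
      have hd10 : (d : Int) ≤ 10 := by
        have := hlt d (by rw [hds]; exact List.mem_cons_self)
        omega
      rw [hds] at hiff
      simp only [hd10, decide_true, Bool.true_and]
      exact decide_eq_decide.mpr hiff
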